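-- pv_equiv track=rewrite | github.com/JaviMaligno/ShowCode | VarsityCode2023/Nation-wide Network/solution.py | net_payments
-- ===== SOURCE A (Python) =====
-- def net_payments(transaction_dict):
--     senders = set(transaction_dict.keys())
--     for sender, receivers in transaction_dict.items():
--         senders.remove(sender)
--         for receiver in set(receivers).intersection(senders):
--             dif = transaction_dict[sender][receiver] - transaction_dict[receiver][sender]
--             if dif > 0:
--                 transaction_dict[sender][receiver] = dif
--                 del transaction_dict[receiver][sender]
--             else:
--                 transaction_dict[receiver][sender] = -dif
--                 del transaction_dict[sender][receiver]
--     return transaction_dict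
-- ===== SOURCE B (Python) =====
-- def net_payments(transaction_dict):
--     # Non-mutating single pass: classify each directed edge by the positions of
--     # its endpoints and rebuild the netted dict directly (return value only; the
--     # original A mutates its argument in place, B leaves it untouched).
--     pos = {k: i for i, k in enumerate(transaction_dict)}
--     result = {}
--     for sender, receivers in transaction_dict.items():
--         inner = {}
--         for receiver, amount in receivers.items():
--             if receiver == sender or receiver not in pos:
--                 inner[receiver] = amount
--             elif pos[sender] < pos[receiver]:
--                 dif = amount - transaction_dict[receiver][sender]
--                 if dif > 0:
--                     inner[receiver] = dif
--             else:
--                 back = transaction_dict[receiver]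
--                 if sender in back:
--                     dif = amount - back[sender]
--                     if dif >= 0:
--                         inner[receiver] = dif
--                 else:
--                     inner[receiver] = amount
--         result[sender] = inner
--     return result
-- ===== Notes on version B (the rewrite author's own statement) =====
-- stated objective: alternative
-- what changed: A mutates the dict in place while scanning with a shrinking set of unprocessed senders; B is a pure single pass that rebuilds the result, classifying each directed edge by the relative positions of its endpoints and reading only the original dict.
import Mathlib
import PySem

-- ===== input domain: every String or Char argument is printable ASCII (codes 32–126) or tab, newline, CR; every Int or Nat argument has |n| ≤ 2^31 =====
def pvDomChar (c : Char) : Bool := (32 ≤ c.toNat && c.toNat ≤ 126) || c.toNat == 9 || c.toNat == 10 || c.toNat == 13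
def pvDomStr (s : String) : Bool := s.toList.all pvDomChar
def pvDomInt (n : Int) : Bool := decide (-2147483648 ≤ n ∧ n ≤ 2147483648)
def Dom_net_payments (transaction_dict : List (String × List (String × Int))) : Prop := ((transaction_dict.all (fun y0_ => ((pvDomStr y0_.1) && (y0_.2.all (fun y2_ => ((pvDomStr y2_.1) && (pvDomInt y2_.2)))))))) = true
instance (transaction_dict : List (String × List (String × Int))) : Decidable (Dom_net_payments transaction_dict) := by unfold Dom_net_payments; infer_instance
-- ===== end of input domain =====

-- B rebuilds the netted dict in one pure pass (classifying each directed edge by endpoint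
-- positions) instead of A's in-place mutation; equivalence is about the RETURN value only
-- (Python A mutates its argument in place, Python B leaves it untouched).

-- ===== PORT A =====
-- The outer dict's keys never change while A runs, so iterating `transaction_dict.items()`
-- is iterating the original key list, re-reading each live row from the current state.
-- Python's iteration order over `set(receivers).intersection(senders)` is unspecified (PySem
-- does not model it); each pair update touches a disjoint pair of entries, so the result is
-- independent of that order and we iterate the intersection in receiver-insertion order.
def net_payments (transaction_dict : List (String × List (String × Int))) : List (String × List (String × Int)) :=
  let td0 : PySem.Dict String (PySem.Dict String Int) :=
    PySem.Dict.mk (transaction_dict.map (fun p => (p.1, PySem.Dict.mk p.2)))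
  let step := fun (st : PySem.Dict String (PySem.Dict String Int) × PySem.Set String) (sender : String) =>
    -- senders.remove(sender): KeyError impossible for a Python dict's key list (Pre_ gives nodup)
    let senders := (PySem.Set.remove? st.2 sender).getD st.2
    let recvs := PySem.Set.inter (PySem.Set.ofList (PySem.Dict.getD st.1 sender (PySem.Dict.mk [])).keys) senders
    let t := recvs.foldl (fun (t : PySem.Dict String (PySem.Dict String Int)) (receiver : String) =>
        -- transaction_dict[sender][receiver] - transaction_dict[receiver][sender];
        -- a missing reverse edge is Python's KeyError, excluded by Pre_ (getD default unreachable there)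
        let dif := (PySem.Dict.getD t sender (PySem.Dict.mk [])).getD receiver 0
                 - (PySem.Dict.getD t receiver (PySem.Dict.mk [])).getD sender 0
        if 0 < dif then
          let t' := PySem.Dict.modify t sender (PySem.Dict.mk []) (fun inner => inner.insert receiver dif)
          PySem.Dict.modify t' receiver (PySem.Dict.mk []) (fun inner => inner.erase sender)
        else
          let t' := PySem.Dict.modify t receiver (PySem.Dict.mk []) (fun inner => inner.insert sender (-dif))
          PySem.Dict.modify t' sender (PySem.Dict.mk []) (fun inner => inner.erase receiver)) st.1
    (t, senders)
  let final := (transaction_dict.map Prod.fst).foldl step (td0, PySem.Set.ofList (transaction_dict.map Prod.fst))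
  final.1.items.map (fun p => (p.1, p.2.items))

-- ===== PORT B =====
def net_payments_alt (transaction_dict : List (String × List (String × Int))) : List (String × List (String × Int)) :=
  let td : PySem.Dict String (PySem.Dict String Int) :=
    PySem.Dict.mk (transaction_dict.map (fun p => (p.1, PySem.Dict.mk p.2)))
  let pos : PySem.Dict String Int :=
    (PySem.List.enumerate (transaction_dict.map Prod.fst)).foldl
      (fun d q => d.insert q.2 q.1) PySem.Dict.empty
  td.items.map (fun p =>
    let sender := p.1
    let inner := p.2.items.foldl (fun (inner : PySem.Dict String Int) q =>
        let receiver := q.1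
        let amount := q.2
        if receiver = sender ∨ ¬ (pos.contains receiver = true) then inner.insert receiver amount
        else if pos.getD sender 0 < pos.getD receiver 0 then
          -- amount - transaction_dict[receiver][sender]; missing reverse edge = KeyError, outside Pre_
          let dif := amount - (PySem.Dict.getD td receiver (PySem.Dict.mk [])).getD sender 0
          if 0 < dif then inner.insert receiver dif else inner
        else
          let back := PySem.Dict.getD td receiver (PySem.Dict.mk [])
          if back.contains sender then
            let dif := amount - back.getD sender 0
            if 0 ≤ dif then inner.insert receiver dif else inner
          else inner.insert receiver amount) PySem.Dict.empty
    (sender, inner.items))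

-- ===== PRECONDITION & SPEC =====
-- Pre_ excludes exactly the inputs on which Python A raises: duplicate outer or inner keys
-- cannot occur in a Python dict (the assoc-list encoding would otherwise admit them), and a
-- pair with a forward edge from an earlier key but no reverse edge from the later key makes
-- A raise KeyError at `transaction_dict[receiver][sender]` (B raises there too).
def Pre_net_payments (transaction_dict : List (String × List (String × Int))) : Prop :=
  (transaction_dict.map Prod.fst).Nodup ∧
  (∀ p ∈ transaction_dict, (p.2.map Prod.fst).Nodup) ∧
  List.Pairwise (fun p q => q.1 ∈ p.2.map Prod.fst → p.1 ∈ q.2.map Prod.fst) transaction_dict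
instance (transaction_dict : List (String × List (String × Int))) : Decidable (Pre_net_payments transaction_dict) := by unfold Pre_net_payments; infer_instance

def pvWitness_net_payments : (List (String × List (String × Int))) :=
  [("a", [("b", 5), ("c", 1)]), ("b", [("a", 2)]), ("c", [("a", 4), ("d", 3)])]

def Spec_net_payments (transaction_dict : List (String × List (String × Int))) (out : List (String × List (String × Int))) : Prop := out = net_payments_alt transaction_dict
instance (transaction_dict : List (String × List (String × Int))) (out : List (String × List (String × Int))) : Decidable (Spec_net_payments transaction_dict out) := by unfold Spec_net_payments; infer_instance

-- ===== CLAIM (what is proved, stated in full; the proofs are below) =====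
def Claim_equal_net_payments : Prop := ∀ (transaction_dict : List (String × List (String × Int))), Dom_net_payments transaction_dict → Pre_net_payments transaction_dict → Spec_net_payments transaction_dict (net_payments transaction_dict)

-- ===== LEMMAS AND PROOFS =====

-- Abbreviations for the proof: `pvKeys` the outer key list, `pvRow` a row of the original
-- dict, `pvVal` a directed edge's original value, `pvBefore` the key order.
def pvKeys (td : List (String × List (String × Int))) : List String := td.map Prod.fst
def pvRow (td : List (String × List (String × Int))) (s : String) : List (String × Int) :=
  (PySem.Dict.get? (PySem.Dict.mk td) s).getD []
def pvVal (td : List (String × List (String × Int))) (s r : String) : Option Int :=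
  PySem.Dict.get? (PySem.Dict.mk (pvRow td s)) r
-- The value an examined entry (s, r, a) ends with (`none` = deleted).
def pvFin (td : List (String × List (String × Int))) (s r : String) (a : Int) : Option Int :=
  let b := (pvVal td r s).getD 0
  if (pvKeys td).idxOf s < (pvKeys td).idxOf r then
    (if 0 < a - b then some (a - b) else none)
  else
    (if 0 ≤ a - b then some (a - b) else none)

-- Entry transformer gated by an examined-pairs predicate P.
def pvG (td : List (String × List (String × Int))) (P : String → String → Bool)
    (s r : String) (a : Int) : Option Int :=
  if P s r then pvFin td s r a else some a

def pvMidRow (td : List (String × List (String × Int))) (P : String → String → Bool)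
    (s : String) (row : List (String × Int)) : List (String × Int) :=
  row.filterMap (fun q => (pvG td P s q.1 q.2).map (fun v => (q.1, v)))

-- The dict state after the pairs selected by P have been processed.
def pvMid (td : List (String × List (String × Int))) (P : String → String → Bool) :
    PySem.Dict String (PySem.Dict String Int) :=
  PySem.Dict.mk (td.map (fun p => (p.1, PySem.Dict.mk (pvMidRow td P p.1 p.2))))

-- Examined pairs after the senders in `done` have been fully processed.
def pvExam (td : List (String × List (String × Int))) (done : List String) (s r : String) : Bool :=
  decide (r ∈ pvKeys td) && !(r == s) &&
    ((decide ((pvKeys td).idxOf s < (pvKeys td).idxOf r) && decide (s ∈ done)) ||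
     (decide ((pvKeys td).idxOf r < (pvKeys td).idxOf s) && decide (r ∈ done) && (pvVal td r s).isSome))

-- Examined pairs while sender u is being processed and the receivers in rs are done.
def pvExamP (td : List (String × List (String × Int))) (done : List String) (u : String)
    (rs : List String) (s r : String) : Bool :=
  pvExam td done s r || (s == u && decide (r ∈ rs)) || (r == u && decide (s ∈ rs))


-- A conditional row rebuild: keep entry (r, a) as (r, v) when c r a = some v, drop it on none.
def pvFM (c : String → Int → Option Int) (row : List (String × Int)) : List (String × Int) :=
  row.filterMap (fun q => (c q.1 q.2).map (fun v => (q.1, v)))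

theorem pvMidRow_eq_FM (td : List (String × List (String × Int))) (P : String → String → Bool)
    (s : String) (row : List (String × Int)) :
    pvMidRow td P s row = pvFM (fun r a => pvG td P s r a) row := rfl

-- ---- basic accessors ----
theorem pvRow_of_mem (td : List (String × List (String × Int)))
    (hk : (pvKeys td).Nodup) {p : String × List (String × Int)} (hp : p ∈ td) :
    pvRow td p.1 = p.2 := by
  have h : (PySem.Dict.mk td).get? p.1 = some p.2 :=
    PySem.Dict.get?_of_mem_items _ hp (by simpa [PySem.Dict.keys, pvKeys] using hk)
  simp [pvRow, h]

theorem pvVal_of_mem (td : List (String × List (String × Int)))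
    (hk : (pvKeys td).Nodup) {p : String × List (String × Int)} (hp : p ∈ td)
    (hnd : (p.2.map Prod.fst).Nodup) {q : String × Int} (hq : q ∈ p.2) :
    pvVal td p.1 q.1 = some q.2 := by
  unfold pvVal
  rw [pvRow_of_mem td hk hp]
  exact PySem.Dict.get?_of_mem_items _ hq (by simpa [PySem.Dict.keys] using hnd)

theorem pvVal_isSome_iff (td : List (String × List (String × Int)))
    (hk : (pvKeys td).Nodup) {p : String × List (String × Int)} (hp : p ∈ td) (r : String) :
    (pvVal td p.1 r).isSome = true ↔ r ∈ p.2.map Prod.fst := by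
  unfold pvVal
  rw [pvRow_of_mem td hk hp]
  rw [Option.isSome_iff_ne_none]
  constructor
  · intro h
    by_contra hmem
    exact h ((PySem.Dict.get?_eq_none_iff_not_mem_keys _ _).2 (by simpa [PySem.Dict.keys] using hmem))
  · intro hmem h
    have := (PySem.Dict.get?_eq_none_iff_not_mem_keys _ _).1 h
    exact this (by simpa [PySem.Dict.keys] using hmem)

theorem pv_exists_entry (td : List (String × List (String × Int))) {s : String}
    (hs : s ∈ pvKeys td) : ∃ p ∈ td, p.1 = s := by
  obtain ⟨p, hp, hps⟩ := List.mem_map.1 hs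
  exact ⟨p, hp, hps⟩

theorem pv_entry_unique (td : List (String × List (String × Int)))
    (hk : (pvKeys td).Nodup) {p p' : String × List (String × Int)}
    (hp : p ∈ td) (hp' : p' ∈ td) (h : p.1 = p'.1) : p = p' := by
  exact List.inj_on_of_nodup_map hk hp hp' h

theorem pv_inner_unique {row : List (String × Int)} (hnd : (row.map Prod.fst).Nodup)
    {q q' : String × Int} (hq : q ∈ row) (hq' : q' ∈ row) (h : q.1 = q'.1) : q = q' := by
  exact List.inj_on_of_nodup_map hnd hq hq' h

theorem pvIdx_inj (td : List (String × List (String × Int))) {s r : String}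
    (hs : s ∈ pvKeys td) (hr : r ∈ pvKeys td)
    (h : (pvKeys td).idxOf s = (pvKeys td).idxOf r) : s = r := by
  have h1 := List.getElem_idxOf (List.idxOf_lt_length_of_mem hs)
  have h2 := List.getElem_idxOf (List.idxOf_lt_length_of_mem hr)
  rw [← h1, ← h2]
  congr 1

theorem pv_mut (td : List (String × List (String × Int)))
    (hk : (pvKeys td).Nodup)
    (hmut : List.Pairwise (fun p q => q.1 ∈ p.2.map Prod.fst → p.1 ∈ q.2.map Prod.fst) td)
    {u r : String} (hu : u ∈ pvKeys td) (hr : r ∈ pvKeys td)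
    (hlt : (pvKeys td).idxOf u < (pvKeys td).idxOf r)
    (hmem : r ∈ (pvRow td u).map Prod.fst) : u ∈ (pvRow td r).map Prod.fst := by
  have hlen : (pvKeys td).length = td.length := by simp [pvKeys]
  have hi : (pvKeys td).idxOf u < td.length := hlen ▸ List.idxOf_lt_length_of_mem hu
  have hj : (pvKeys td).idxOf r < td.length := hlen ▸ List.idxOf_lt_length_of_mem hr
  have hgu : td[(pvKeys td).idxOf u].1 = u := by
    have h0 := List.getElem_idxOf (List.idxOf_lt_length_of_mem hu)
    simp only [pvKeys, List.getElem_map] at h0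
    exact h0
  have hgr : td[(pvKeys td).idxOf r].1 = r := by
    have h0 := List.getElem_idxOf (List.idxOf_lt_length_of_mem hr)
    simp only [pvKeys, List.getElem_map] at h0
    exact h0
  have hR := (List.pairwise_iff_getElem.1 hmut) _ _ hi hj hlt
  have hrowu : pvRow td u = td[(pvKeys td).idxOf u].2 := by
    have := pvRow_of_mem td hk (List.getElem_mem hi)
    rwa [hgu] at this
  have hrowr : pvRow td r = td[(pvKeys td).idxOf r].2 := by
    have := pvRow_of_mem td hk (List.getElem_mem hj)
    rwa [hgr] at this
  rw [hrowr]
  rw [hrowu] at hmem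
  rw [← hgu]
  exact hR (by rw [hgr]; exact hmem)

-- ---- order facts from a split keys = done ++ u :: rest ----
theorem pv_mem_rest_iff (td : List (String × List (String × Int))) {done rest : List String}
    {u : String} (hk : (pvKeys td).Nodup) (hsplit : pvKeys td = done ++ u :: rest) (x : String) :
    x ∈ rest ↔ x ∈ pvKeys td ∧ (pvKeys td).idxOf u < (pvKeys td).idxOf x := by
  rw [hsplit] at hk ⊢
  have hnd := hk
  rw [List.nodup_append] at hnd
  obtain ⟨hd, hur, hdisj⟩ := hnd
  have hu_nd : u ∉ done := fun h => hdisj u h u List.mem_cons_self rfl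
  have hu_nr : u ∉ rest := by simpa using (List.nodup_cons.1 hur).1
  have hidxu : (done ++ u :: rest).idxOf u = done.length := by
    rw [List.idxOf_append_of_notMem hu_nd]; simp [List.idxOf_cons_self]
  constructor
  · intro hx
    have hxd : x ∉ done := fun h => hdisj x h x (List.mem_cons_of_mem _ hx) rfl
    have hxu : x ≠ u := fun h => hu_nr (h ▸ hx)
    have : (done ++ u :: rest).idxOf x = done.length + (rest.idxOf x + 1) := by
      rw [List.idxOf_append_of_notMem hxd, List.idxOf_cons_ne _ (Ne.symm hxu)]
    refine ⟨by simp [hx], ?_⟩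
    rw [hidxu, this]
    omega
  · rintro ⟨hmem, hlt⟩
    rw [hidxu] at hlt
    by_cases hxd : x ∈ done
    · have : (done ++ u :: rest).idxOf x = done.idxOf x := List.idxOf_append_of_mem hxd
      have := List.idxOf_lt_length_of_mem hxd
      omega
    · rcases List.mem_append.1 hmem with h | h
      · exact absurd h hxd
      · rcases List.mem_cons.1 h with h | h
        · subst h; omega
        · exact h

theorem pv_mem_done_iff (td : List (String × List (String × Int))) {done rest : List String}
    {u : String} (hk : (pvKeys td).Nodup) (hsplit : pvKeys td = done ++ u :: rest) (x : String) :
    x ∈ done ↔ x ∈ pvKeys td ∧ (pvKeys td).idxOf x < (pvKeys td).idxOf u := by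
  rw [hsplit] at hk ⊢
  have hnd := hk
  rw [List.nodup_append] at hnd
  obtain ⟨hd, hur, hdisj⟩ := hnd
  have hu_nd : u ∉ done := fun h => hdisj u h u List.mem_cons_self rfl
  have hu_nr : u ∉ rest := by simpa using (List.nodup_cons.1 hur).1
  have hidxu : (done ++ u :: rest).idxOf u = done.length := by
    rw [List.idxOf_append_of_notMem hu_nd]; simp [List.idxOf_cons_self]
  constructor
  · intro hx
    refine ⟨by simp [hx], ?_⟩
    rw [hidxu, List.idxOf_append_of_mem hx]
    exact List.idxOf_lt_length_of_mem hx
  · rintro ⟨hmem, hlt⟩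
    rw [hidxu] at hlt
    by_cases hxd : x ∈ done
    · exact hxd
    · exfalso
      have hxu : x ≠ u := by rintro rfl; omega
      rcases List.mem_append.1 hmem with h | h
      · exact hxd h
      · rcases List.mem_cons.1 h with h | h
        · exact hxu h
        · have : (done ++ u :: rest).idxOf x = done.length + (rest.idxOf x + 1) := by
            rw [List.idxOf_append_of_notMem hxd, List.idxOf_cons_ne _ (Ne.symm hxu)]
          omega

-- ---- pvMid access and congruence ----
theorem pvMid_congr (td : List (String × List (String × Int))) {P P' : String → String → Bool}
    (h : ∀ p ∈ td, ∀ q ∈ p.2, P p.1 q.1 = P' p.1 q.1) : pvMid td P = pvMid td P' := by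
  unfold pvMid
  congr 1
  apply List.map_congr_left
  intro p hp
  congr 1
  congr 1
  unfold pvMidRow
  apply List.filterMap_congr
  intro q hq
  simp [pvG, h p hp q hq]

theorem pvMid_getD (td : List (String × List (String × Int))) (P : String → String → Bool)
    (hk : (pvKeys td).Nodup) {p : String × List (String × Int)} (hp : p ∈ td) :
    PySem.Dict.getD (pvMid td P) p.1 (PySem.Dict.mk []) = PySem.Dict.mk (pvMidRow td P p.1 p.2) := by
  apply PySem.Dict.getD_of_mem_items
  · show (p.1, PySem.Dict.mk (pvMidRow td P p.1 p.2)) ∈ td.map _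
    exact List.mem_map.2 ⟨p, hp, rfl⟩
  · show ((td.map _).map Prod.fst).Nodup
    simpa [List.map_map, Function.comp_def, pvKeys] using hk

theorem pvFM_keys_sublist (c : String → Int → Option Int) (row : List (String × Int)) :
    ((pvFM c row).map Prod.fst).Sublist (row.map Prod.fst) := by
  induction row with
  | nil => simp [pvFM]
  | cons q row ih =>
    unfold pvFM at ih ⊢
    rw [List.filterMap_cons]
    cases hc : c q.1 q.2 with
    | none => simp only [List.map_cons]; exact ih.cons _
    | some v => simp only [List.map_cons]; exact ih.cons₂ _

theorem pvFM_nodup (c : String → Int → Option Int) {row : List (String × Int)}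
    (hnd : (row.map Prod.fst).Nodup) : ((pvFM c row).map Prod.fst).Nodup := by
  exact (pvFM_keys_sublist c row).nodup hnd

theorem pvFM_congr {c c' : String → Int → Option Int} {row : List (String × Int)}
    (h : ∀ q ∈ row, c q.1 q.2 = c' q.1 q.2) : pvFM c row = pvFM c' row := by
  unfold pvFM
  exact List.filterMap_congr (fun q hq => by rw [h q hq])

theorem pvFM_id (row : List (String × Int)) : pvFM (fun _ a => some a) row = row := by
  unfold pvFM
  simp

theorem pvFM_getD {c : String → Int → Option Int} {row : List (String × Int)}
    (hnd : (row.map Prod.fst).Nodup) {q : String × Int} (hq : q ∈ row) {v : Int}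
    (hc : c q.1 q.2 = some v) :
    PySem.Dict.getD (PySem.Dict.mk (pvFM c row)) q.1 0 = v := by
  apply PySem.Dict.getD_of_mem_items
  · show (q.1, v) ∈ pvFM c row
    exact List.mem_filterMap.2 ⟨q, hq, by rw [hc]; rfl⟩
  · show ((pvFM c row).map Prod.fst).Nodup
    exact pvFM_nodup c hnd

theorem pvFM_map_replace {c c' : String → Int → Option Int} {row : List (String × Int)}
    {r : String} {v : Int}
    (h1 : ∀ q ∈ row, q.1 = r → (c q.1 q.2).isSome = true ∧ c' q.1 q.2 = some v)
    (h2 : ∀ q ∈ row, q.1 ≠ r → c' q.1 q.2 = c q.1 q.2) :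
    (pvFM c row).map (fun p => if (p.1 == r) = true then (r, v) else p) = pvFM c' row := by
  induction row with
  | nil => simp [pvFM]
  | cons q row ih =>
    have ih' := ih (fun q hq => h1 q (List.mem_cons_of_mem _ hq))
      (fun q hq => h2 q (List.mem_cons_of_mem _ hq))
    unfold pvFM at ih' ⊢
    rw [List.filterMap_cons]
    by_cases hqr : q.1 = r
    · obtain ⟨hsome, hc'⟩ := h1 q List.mem_cons_self hqr
      cases hc : c q.1 q.2 with
      | none => rw [hc] at hsome; simp at hsome
      | some w =>
        rw [List.filterMap_cons, hc']
        simp only [Option.map_some, List.map_cons, hqr]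
        rw [ih']
        simp
    · rw [List.filterMap_cons, h2 q List.mem_cons_self hqr]
      cases hc : c q.1 q.2 with
      | none => simpa using ih'
      | some w =>
        simp only [Option.map_some, List.map_cons]
        rw [ih']
        simp [hqr]

theorem pvFM_insert {c c' : String → Int → Option Int} {row : List (String × Int)}
    {r : String} {v : Int}
    (hmem : r ∈ row.map Prod.fst)
    (h1 : ∀ q ∈ row, q.1 = r → (c q.1 q.2).isSome = true ∧ c' q.1 q.2 = some v)
    (h2 : ∀ q ∈ row, q.1 ≠ r → c' q.1 q.2 = c q.1 q.2) :
    (PySem.Dict.mk (pvFM c row)).insert r v = PySem.Dict.mk (pvFM c' row) := by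
  have hcont : (PySem.Dict.mk (pvFM c row)).contains r = true := by
    obtain ⟨q, hq, hqr⟩ := List.mem_map.1 hmem
    obtain ⟨hsome, _⟩ := h1 q hq hqr
    obtain ⟨w, hw⟩ := Option.isSome_iff_exists.1 hsome
    rw [PySem.Dict.contains_iff_mem_keys]
    show r ∈ (pvFM c row).map Prod.fst
    exact List.mem_map.2 ⟨(q.1, w), List.mem_filterMap.2 ⟨q, hq, by rw [hw]; rfl⟩, hqr⟩
  apply PySem.Dict.ext
  rw [PySem.Dict.items_insert_of_contains _ _ hcont]
  exact pvFM_map_replace h1 h2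

theorem pvFM_erase {c c' : String → Int → Option Int} {row : List (String × Int)} {r : String}
    (h1 : ∀ q ∈ row, q.1 = r → c' q.1 q.2 = none)
    (h2 : ∀ q ∈ row, q.1 ≠ r → c' q.1 q.2 = c q.1 q.2) :
    (PySem.Dict.mk (pvFM c row)).erase r = PySem.Dict.mk (pvFM c' row) := by
  apply PySem.Dict.ext
  show (pvFM c row).filter (fun p => !(p.1 == r)) = pvFM c' row
  induction row with
  | nil => simp [pvFM]
  | cons q row ih =>
    have ih' := ih (fun q hq => h1 q (List.mem_cons_of_mem _ hq))
      (fun q hq => h2 q (List.mem_cons_of_mem _ hq))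
    unfold pvFM at ih' ⊢
    rw [List.filterMap_cons, List.filterMap_cons]
    by_cases hqr : q.1 = r
    · rw [h1 q List.mem_cons_self hqr]
      cases hc : c q.1 q.2 with
      | none => simpa using ih'
      | some w =>
        simp only [Option.map_some, List.filter_cons, hqr]
        simpa using ih'
    · rw [h2 q List.mem_cons_self hqr]
      cases hc : c q.1 q.2 with
      | none => simpa using ih'
      | some w =>
        simp only [Option.map_some, List.filter_cons]
        rw [ih']
        simp [hqr]

theorem pvFM_filter_keys {c : String → Int → Option Int} {row : List (String × Int)}
    {p : String → Bool} (h : ∀ q ∈ row, c q.1 q.2 = none → p q.1 = false) :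
    ((pvFM c row).map Prod.fst).filter p = (row.map Prod.fst).filter p := by
  induction row with
  | nil => simp [pvFM]
  | cons q row ih =>
    have ih' := ih (fun q hq => h q (List.mem_cons_of_mem _ hq))
    unfold pvFM at ih' ⊢
    rw [List.filterMap_cons]
    cases hc : c q.1 q.2 with
    | none =>
      have hp := h q List.mem_cons_self hc
      simp only [List.map_cons, List.filter_cons, hp]
      simpa using ih'
    | some w =>
      simp only [Option.map_some, List.map_cons, List.filter_cons]
      rw [ih']

theorem pvMid_modify (td : List (String × List (String × Int))) (P : String → String → Bool)
    (hk : (pvKeys td).Nodup) {p0 : String × List (String × Int)} (hp0 : p0 ∈ td)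
    (f : PySem.Dict String Int → PySem.Dict String Int) :
    PySem.Dict.modify (pvMid td P) p0.1 (PySem.Dict.mk []) f
      = PySem.Dict.mk (td.map (fun p => (p.1,
          if p.1 = p0.1 then f (PySem.Dict.mk (pvMidRow td P p.1 p.2))
          else PySem.Dict.mk (pvMidRow td P p.1 p.2)))) := by
  unfold PySem.Dict.modify
  rw [pvMid_getD td P hk hp0]
  have hcont : (pvMid td P).contains p0.1 = true := by
    rw [PySem.Dict.contains_iff_mem_keys]
    show p0.1 ∈ (td.map _).map Prod.fst
    exact List.mem_map.2 ⟨_, List.mem_map.2 ⟨p0, hp0, rfl⟩, rfl⟩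
  apply PySem.Dict.ext
  rw [PySem.Dict.items_insert_of_contains _ _ hcont]
  show (td.map _).map _ = td.map _
  rw [List.map_map]
  apply List.map_congr_left
  intro p hp
  by_cases hps : p.1 = p0.1
  · have hpp0 : p = p0 := pv_entry_unique td hk hp hp0 hps
    subst hpp0
    simp
  · simp [hps]

-- ---- the body of A's inner loop, named so the invariant can speak about it ----
def pvStepA (sender : String) (t : PySem.Dict String (PySem.Dict String Int)) (receiver : String) :
    PySem.Dict String (PySem.Dict String Int) :=
  let dif := (PySem.Dict.getD t sender (PySem.Dict.mk [])).getD receiver 0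
           - (PySem.Dict.getD t receiver (PySem.Dict.mk [])).getD sender 0
  if 0 < dif then
    let t' := PySem.Dict.modify t sender (PySem.Dict.mk []) (fun inner => inner.insert receiver dif)
    PySem.Dict.modify t' receiver (PySem.Dict.mk []) (fun inner => inner.erase sender)
  else
    let t' := PySem.Dict.modify t receiver (PySem.Dict.mk []) (fun inner => inner.insert sender (-dif))
    PySem.Dict.modify t' sender (PySem.Dict.mk []) (fun inner => inner.erase receiver)

theorem pvStep_spec (td : List (String × List (String × Int)))
    (hk : (pvKeys td).Nodup) (hin : ∀ p ∈ td, (p.2.map Prod.fst).Nodup)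
    {P P' : String → String → Bool} {u r : String} {a b : Int}
    (hu : u ∈ pvKeys td) (hr : r ∈ pvKeys td) (hur : u ≠ r)
    (hlt : (pvKeys td).idxOf u < (pvKeys td).idxOf r)
    (ha : pvVal td u r = some a) (hb : pvVal td r u = some b)
    (hPur : P u r = false) (hPru : P r u = false)
    (hP' : ∀ s x, ¬(s = u ∧ x = r) → ¬(s = r ∧ x = u) → P' s x = P s x)
    (hP'ur : P' u r = true) (hP'ru : P' r u = true) :
    pvStepA u (pvMid td P) r = pvMid td P' := by
  obtain ⟨pu, hpu, hpu1⟩ := pv_exists_entry td hu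
  obtain ⟨pr, hpr, hpr1⟩ := pv_exists_entry td hr
  have hndu : (pu.2.map Prod.fst).Nodup := hin pu hpu
  have hndr : (pr.2.map Prod.fst).Nodup := hin pr hpr
  have hrowu : pvRow td u = pu.2 := by rw [← hpu1]; exact pvRow_of_mem td hk hpu
  have hrowr : pvRow td r = pr.2 := by rw [← hpr1]; exact pvRow_of_mem td hk hpr
  have hra : (r, a) ∈ pu.2 := by
    have := PySem.Dict.mem_items_of_get?_eq_some _ ha
    rwa [hrowu] at this
  have hub : (u, b) ∈ pr.2 := by
    have := PySem.Dict.mem_items_of_get?_eq_some _ hb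
    rwa [hrowr] at this
  have hgetu : PySem.Dict.getD (pvMid td P) u (PySem.Dict.mk [])
      = PySem.Dict.mk (pvFM (fun x w => pvG td P u x w) pu.2) := by
    have h0 := pvMid_getD td P hk hpu
    rw [hpu1] at h0
    rw [h0, pvMidRow_eq_FM]
  have hgetr : PySem.Dict.getD (pvMid td P) r (PySem.Dict.mk [])
      = PySem.Dict.mk (pvFM (fun x w => pvG td P r x w) pr.2) := by
    have h0 := pvMid_getD td P hk hpr
    rw [hpr1] at h0
    rw [h0, pvMidRow_eq_FM]
  have hvu : PySem.Dict.getD (PySem.Dict.mk (pvFM (fun x w => pvG td P u x w) pu.2)) r 0 = a :=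
    pvFM_getD hndu hra (by simp [pvG, hPur])
  have hvr : PySem.Dict.getD (PySem.Dict.mk (pvFM (fun x w => pvG td P r x w) pr.2)) u 0 = b :=
    pvFM_getD hndr hub (by simp [pvG, hPru])
  have hnlt : ¬ (pvKeys td).idxOf r < (pvKeys td).idxOf u := by omega
  have hfin_ur : pvFin td u r a = if 0 < a - b then some (a - b) else none := by
    simp [pvFin, hb, hlt]
  have hfin_ru : pvFin td r u b = if 0 < a - b then none else some (b - a) := by
    simp only [pvFin, ha, Option.getD_some, if_neg hnlt]
    by_cases hC : 0 < a - b
    · rw [if_neg (by omega), if_pos hC]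
    · rw [if_pos (by omega), if_neg hC]
  -- the two inner-dict rewrites, as predicate updates
  have hins_u : ∀ v, pvG td P' u r a = some v →
      (PySem.Dict.mk (pvFM (fun x w => pvG td P u x w) pu.2)).insert r v
        = PySem.Dict.mk (pvFM (fun x w => pvG td P' u x w) pu.2) := by
    intro v hv
    apply pvFM_insert (List.mem_map.2 ⟨(r, a), hra, rfl⟩)
    · intro q hq hqr
      have : q = (r, a) := pv_inner_unique hndu hq hra hqr
      subst this
      exact ⟨by simp [pvG, hPur], hv⟩
    · intro q hq hqr
      simp only [pvG]
      rw [hP' u q.1 (fun h => hqr h.2) (fun h => hur h.1)]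
  have hins_r : ∀ v, pvG td P' r u b = some v →
      (PySem.Dict.mk (pvFM (fun x w => pvG td P r x w) pr.2)).insert u v
        = PySem.Dict.mk (pvFM (fun x w => pvG td P' r x w) pr.2) := by
    intro v hv
    apply pvFM_insert (List.mem_map.2 ⟨(u, b), hub, rfl⟩)
    · intro q hq hqu
      have : q = (u, b) := pv_inner_unique hndr hq hub hqu
      subst this
      exact ⟨by simp [pvG, hPru], hv⟩
    · intro q hq hqu
      simp only [pvG]
      rw [hP' r q.1 (fun h => hur h.1.symm) (fun h => hqu h.2)]
  have hers_u : pvG td P' u r a = none →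
      (PySem.Dict.mk (pvFM (fun x w => pvG td P u x w) pu.2)).erase r
        = PySem.Dict.mk (pvFM (fun x w => pvG td P' u x w) pu.2) := by
    intro hv
    apply pvFM_erase
    · intro q hq hqr
      have : q = (r, a) := pv_inner_unique hndu hq hra hqr
      subst this
      exact hv
    · intro q hq hqr
      simp only [pvG]
      rw [hP' u q.1 (fun h => hqr h.2) (fun h => hur h.1)]
  have hers_r : pvG td P' r u b = none →
      (PySem.Dict.mk (pvFM (fun x w => pvG td P r x w) pr.2)).erase u
        = PySem.Dict.mk (pvFM (fun x w => pvG td P' r x w) pr.2) := by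
    intro hv
    apply pvFM_erase
    · intro q hq hqu
      have : q = (u, b) := pv_inner_unique hndr hq hub hqu
      subst this
      exact hv
    · intro q hq hqu
      simp only [pvG]
      rw [hP' r q.1 (fun h => hur h.1.symm) (fun h => hqu h.2)]
  -- predicate mixtures
  set Pm : String → String → Bool := fun s x => if s = u then P' s x else P s x with hPm
  set Pn : String → String → Bool := fun s x => if s = r then P' s x else Pm s x with hPn
  have hPm_rows : ∀ p ∈ td, pvFM (fun x w => pvG td Pm p.1 x w) p.2
      = if p.1 = u then pvFM (fun x w => pvG td P' p.1 x w) p.2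
        else pvFM (fun x w => pvG td P p.1 x w) p.2 := by
    intro p hp
    by_cases hpu' : p.1 = u
    · rw [if_pos hpu']
      exact pvFM_congr (fun q hq => by simp [pvG, hPm, hpu'])
    · rw [if_neg hpu']
      exact pvFM_congr (fun q hq => by simp [pvG, hPm, hpu'])
  have hPn_rows : ∀ p ∈ td, pvFM (fun x w => pvG td Pn p.1 x w) p.2
      = if p.1 = r then pvFM (fun x w => pvG td P' p.1 x w) p.2
        else pvFM (fun x w => pvG td Pm p.1 x w) p.2 := by
    intro p hp
    by_cases hpr' : p.1 = r
    · rw [if_pos hpr']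
      exact pvFM_congr (fun q hq => by simp [pvG, hPn, hpr'])
    · rw [if_neg hpr']
      apply pvFM_congr
      intro q hq
      simp only [pvG, hPn]
      rw [if_neg hpr']
  have hPnP' : ∀ s x, Pn s x = P' s x := by
    intro s x
    simp only [hPn, hPm]
    by_cases hs1 : s = r
    · rw [if_pos hs1]
    · rw [if_neg hs1]
      by_cases hs2 : s = u
      · rw [if_pos hs2]
      · rw [if_neg hs2]
        exact (hP' s x (fun h => hs2 h.1) (fun h => hs1 h.1)).symm
  unfold pvStepA
  rw [hgetu, hgetr, hvu, hvr]
  by_cases hC : 0 < a - b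
  · rw [if_pos hC]
    have h1 : PySem.Dict.modify (pvMid td P) u (PySem.Dict.mk [])
        (fun inner => inner.insert r (a - b)) = pvMid td Pm := by
      have h0 := pvMid_modify td P hk hpu (f := fun inner => inner.insert r (a - b))
      rw [hpu1] at h0
      rw [h0]
      unfold pvMid
      congr 1
      apply List.map_congr_left
      intro p hp
      by_cases hpe : p.1 = u
      · rw [if_pos hpe]
        have hppu : p = pu := pv_entry_unique td hk hp hpu (by rw [hpe, hpu1])
        congr 1
        rw [pvMidRow_eq_FM, pvMidRow_eq_FM, hPm_rows p hp, if_pos hpe, hppu, hpu1]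
        exact hins_u (a - b) (by simp [pvG, hP'ur, hfin_ur]; omega)
      · rw [if_neg hpe]
        congr 2
        rw [pvMidRow_eq_FM, pvMidRow_eq_FM, hPm_rows p hp, if_neg hpe]
    rw [h1]
    have h2 : PySem.Dict.modify (pvMid td Pm) r (PySem.Dict.mk [])
        (fun inner => inner.erase u) = pvMid td Pn := by
      have h0 := pvMid_modify td Pm hk hpr (f := fun inner => inner.erase u)
      rw [hpr1] at h0
      rw [h0]
      unfold pvMid
      congr 1
      apply List.map_congr_left
      intro p hp
      by_cases hpe : p.1 = r
      · rw [if_pos hpe]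
        have hppr : p = pr := pv_entry_unique td hk hp hpr (by rw [hpe, hpr1])
        congr 1
        rw [pvMidRow_eq_FM, pvMidRow_eq_FM, hPn_rows p hp, if_pos hpe,
          hPm_rows p hp, if_neg (by rw [hpe]; exact fun h => hur h.symm), hppr, hpr1]
        exact hers_r (by simp [pvG, hP'ru, hfin_ru]; omega)
      · rw [if_neg hpe]
        congr 2
        rw [pvMidRow_eq_FM, pvMidRow_eq_FM, hPn_rows p hp, if_neg hpe]
    rw [h2]
    exact pvMid_congr td (fun p hp q hq => hPnP' p.1 q.1)
  · rw [if_neg hC]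
    have hQm_rows : ∀ p ∈ td, pvFM (fun x w => pvG td Pn p.1 x w) p.2
        = if p.1 = r then pvFM (fun x w => pvG td P' p.1 x w) p.2
          else pvFM (fun x w => pvG td (fun s x => if s = u then P' s x else P s x) p.1 x w) p.2 := by
      intro p hp
      exact hPn_rows p hp
    have hneg : -(a - b) = b - a := by ring
    have h1 : PySem.Dict.modify (pvMid td P) r (PySem.Dict.mk [])
        (fun inner => inner.insert u (-(a - b))) = pvMid td (fun s x => if s = r then P' s x else P s x) := by
      have h0 := pvMid_modify td P hk hpr (f := fun inner => inner.insert u (-(a - b)))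
      rw [hpr1] at h0
      rw [h0]
      unfold pvMid
      congr 1
      apply List.map_congr_left
      intro p hp
      by_cases hpe : p.1 = r
      · rw [if_pos hpe]
        have hppr : p = pr := pv_entry_unique td hk hp hpr (by rw [hpe, hpr1])
        congr 1
        rw [pvMidRow_eq_FM, pvMidRow_eq_FM, hppr, hpr1, hneg]
        have hrowP' : pvFM (fun x w => pvG td (fun s x => if s = r then P' s x else P s x) r x w) pr.2
            = pvFM (fun x w => pvG td P' r x w) pr.2 := by
          apply pvFM_congr
          intro q hq
          simp [pvG]
        rw [hrowP']
        exact hins_r (b - a) (by simp [pvG, hP'ru, hfin_ru]; omega)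
      · rw [if_neg hpe]
        congr 2
        rw [pvMidRow_eq_FM, pvMidRow_eq_FM]
        apply pvFM_congr
        intro q hq
        simp [pvG, hpe]
    rw [h1]
    have h2 : PySem.Dict.modify (pvMid td (fun s x => if s = r then P' s x else P s x)) u (PySem.Dict.mk [])
        (fun inner => inner.erase r) = pvMid td P' := by
      have h0 := pvMid_modify td (fun s x => if s = r then P' s x else P s x) hk hpu (f := fun inner => inner.erase r)
      rw [hpu1] at h0
      rw [h0]
      unfold pvMid
      congr 1
      apply List.map_congr_left
      intro p hp
      by_cases hpe : p.1 = u
      · rw [if_pos hpe]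
        have hppu : p = pu := pv_entry_unique td hk hp hpu (by rw [hpe, hpu1])
        congr 1
        rw [pvMidRow_eq_FM, pvMidRow_eq_FM, hppu, hpu1]
        have hrowP : pvFM (fun x w => pvG td (fun s x => if s = r then P' s x else P s x) u x w) pu.2
            = pvFM (fun x w => pvG td P u x w) pu.2 := by
          apply pvFM_congr
          intro q hq
          simp [pvG, hur]
        rw [hrowP]
        exact hers_u (by simp [pvG, hP'ur, hfin_ur]; omega)
      · rw [if_neg hpe]
        congr 2
        rw [pvMidRow_eq_FM, pvMidRow_eq_FM]
        apply pvFM_congr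
        intro q hq
        simp only [pvG]
        by_cases hpe2 : p.1 = r
        · simp [hpe2]
        · simp [hpe2, hP' p.1 q.1 (fun h => hpe h.1) (fun h => hpe2 h.1)]
    rw [h2]

theorem pv_inner_loop (td : List (String × List (String × Int)))
    (hk : (pvKeys td).Nodup) (hin : ∀ p ∈ td, (p.2.map Prod.fst).Nodup)
    (hmut : List.Pairwise (fun p q => q.1 ∈ p.2.map Prod.fst → p.1 ∈ q.2.map Prod.fst) td)
    {done rest : List String} {u : String} (hsplit : pvKeys td = done ++ u :: rest)
    (rs' rs : List String) (hnd : (rs ++ rs').Nodup)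
    (hsub : ∀ x ∈ rs ++ rs', x ∈ rest ∧ x ∈ (pvRow td u).map Prod.fst) :
    rs'.foldl (pvStepA u) (pvMid td (pvExamP td done u rs))
      = pvMid td (pvExamP td done u (rs ++ rs')) := by
  induction rs' generalizing rs with
  | nil => simp
  | cons r rs'' ih =>
    have hkk := hk
    rw [hsplit, List.nodup_append] at hkk
    obtain ⟨hd, hur', hdisj⟩ := hkk
    have hu_nd : u ∉ done := fun h => hdisj u h u List.mem_cons_self rfl
    have hu_nr : u ∉ rest := by simpa using (List.nodup_cons.1 hur').1
    have hu : u ∈ pvKeys td := by rw [hsplit]; exact List.mem_append_right _ List.mem_cons_self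
    have hrmem := hsub r (by simp)
    obtain ⟨hr_rest, hr_row⟩ := hrmem
    have hr' := (pv_mem_rest_iff td hk hsplit r).1 hr_rest
    obtain ⟨hr, hidx⟩ := hr'
    have hne : u ≠ r := fun h => by rw [← h] at hidx; omega
    have hrnotrs : r ∉ rs := by
      have := hnd
      rw [List.nodup_append] at this
      exact fun h => this.2.2 r h r List.mem_cons_self rfl
    have hu_nrs : ∀ x ∈ rs ++ [r], x ≠ u := by
      intro x hx
      rcases List.mem_append.1 hx with h | h
      · exact fun he => hu_nr (he ▸ (hsub x (List.mem_append_left _ h)).1)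
      · simp at h
        exact fun he => hne (he ▸ h.symm).symm
    -- original values of the two directions
    obtain ⟨pu, hpu, hpu1⟩ := pv_exists_entry td hu
    have hrowu : pvRow td u = pu.2 := by rw [← hpu1]; exact pvRow_of_mem td hk hpu
    obtain ⟨qa, hqa, hqa1⟩ := List.mem_map.1 (hrowu ▸ hr_row)
    have ha : pvVal td u r = some qa.2 := by
      have := pvVal_of_mem td hk hpu (hin pu hpu) hqa
      rwa [hpu1, hqa1] at this
    have hmemru : u ∈ (pvRow td r).map Prod.fst := pv_mut td hk hmut hu hr hidx hr_row
    obtain ⟨pr, hpr, hpr1⟩ := pv_exists_entry td hr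
    have hrowr : pvRow td r = pr.2 := by rw [← hpr1]; exact pvRow_of_mem td hk hpr
    obtain ⟨qb, hqb, hqb1⟩ := List.mem_map.1 (hrowr ▸ hmemru)
    have hb : pvVal td r u = some qb.2 := by
      have := pvVal_of_mem td hk hpr (hin pr hpr) hqb
      rwa [hpr1, hqb1] at this
    have hnidx : ¬ ((pvKeys td).idxOf r < (pvKeys td).idxOf u) := by omega
    have hPur : pvExamP td done u rs u r = false := by
      simp [pvExamP, pvExam, hu_nd, hrnotrs, hne, Ne.symm hne, hnidx]
    have hPru : pvExamP td done u rs r u = false := by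
      simp [pvExamP, pvExam, hu_nd, hrnotrs, hne, Ne.symm hne, hnidx]
    have hstep := pvStep_spec td hk hin hu hr hne hidx ha hb hPur hPru
      (P' := pvExamP td done u (rs ++ [r]))
      (by
        intro s x h1 h2
        simp only [pvExamP]
        congr 1
        · congr 1
          by_cases hsu : s = u
          · have hxr : x ≠ r := fun h => h1 ⟨hsu, h⟩
            simp [hsu, List.mem_append, hxr]
          · have hf : (s == u) = false := by simp [hsu]
            rw [hf]
            simp
        · by_cases hxu : x = u
          · have hsr : s ≠ r := fun h => h2 ⟨h, hxu⟩
            simp [hxu, List.mem_append, hsr]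
          · have hf : (x == u) = false := by simp [hxu]
            rw [hf]
            simp)
      (by simp [pvExamP, List.mem_append])
      (by simp [pvExamP, List.mem_append])
    rw [List.foldl_cons, hstep, ih (rs ++ [r])
      (by rwa [List.append_assoc, List.singleton_append])
      (by intro x hx; exact hsub x (by rwa [List.append_assoc, List.singleton_append] at hx))]
    rw [List.append_assoc, List.singleton_append]

theorem pv_exam_step (td : List (String × List (String × Int)))
    (hk : (pvKeys td).Nodup) {done rest : List String} {u : String}
    (hsplit : pvKeys td = done ++ u :: rest) {recvs : List String}
    (hrec : ∀ x, x ∈ recvs ↔ x ∈ (pvRow td u).map Prod.fst ∧ x ∈ rest)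
    {p : String × List (String × Int)} (hp : p ∈ td) {q : String × Int} (hq : q ∈ p.2) :
    pvExamP td done u recvs p.1 q.1 = pvExam td (done ++ [u]) p.1 q.1 := by
  have hs : p.1 ∈ pvKeys td := List.mem_map.2 ⟨p, hp, rfl⟩
  have hx_row : q.1 ∈ (pvRow td p.1).map Prod.fst := by
    rw [pvRow_of_mem td hk hp]; exact List.mem_map.2 ⟨q, hq, rfl⟩
  have hu : u ∈ pvKeys td := by rw [hsplit]; exact List.mem_append_right _ List.mem_cons_self
  obtain ⟨pu, hpu, hpu1⟩ := pv_exists_entry td hu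
  have hrowu : pvRow td u = pu.2 := by rw [← hpu1]; exact pvRow_of_mem td hk hpu
  have hF5 : ∀ y, (pvVal td u y).isSome = true ↔ y ∈ (pvRow td u).map Prod.fst := by
    intro y
    rw [hrowu, ← hpu1]
    exact pvVal_isSome_iff td hk hpu y
  have hdone := fun y => pv_mem_done_iff td hk hsplit y
  have hrest := fun y => pv_mem_rest_iff td hk hsplit y
  rw [Bool.eq_iff_iff]
  simp only [pvExamP, pvExam, Bool.or_eq_true, Bool.and_eq_true, decide_eq_true_eq,
    Bool.not_eq_true', beq_eq_false_iff_ne, beq_iff_eq, hrec]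
  constructor
  · rintro ((⟨⟨hxk, hxs⟩, hcase⟩ | ⟨hsu, hxrow, hxrest⟩) | ⟨hxu, hsrow, hsrest⟩)
    · refine ⟨⟨hxk, hxs⟩, ?_⟩
      rcases hcase with ⟨h1, h2⟩ | ⟨⟨h1, h2⟩, h3⟩
      · exact Or.inl ⟨h1, List.mem_append_left _ h2⟩
      · exact Or.inr ⟨⟨h1, List.mem_append_left _ h2⟩, h3⟩
    · obtain ⟨hxk, hlt⟩ := (hrest q.1).1 hxrest
      refine ⟨⟨hxk, ?_⟩, Or.inl ⟨by rw [hsu]; exact hlt, List.mem_append_right _ (by simp [hsu])⟩⟩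
      intro h
      rw [h, hsu] at hlt
      omega
    · obtain ⟨hsk, hlt⟩ := (hrest p.1).1 hsrest
      have hsm : (pvVal td q.1 p.1).isSome = true := by rw [hxu]; exact (hF5 p.1).2 hsrow
      refine ⟨⟨by rw [hxu]; exact hu, ?_⟩,
        Or.inr ⟨⟨by rw [hxu]; exact hlt, List.mem_append_right _ (by simp [hxu])⟩, hsm⟩⟩
      intro h
      rw [← h, hxu] at hlt
      omega
  · rintro ⟨⟨hxk, hxs⟩, hcase | hcase⟩
    · obtain ⟨hlt, hmem⟩ := hcase
      rcases List.mem_append.1 hmem with hmem | hmem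
      · exact Or.inl (Or.inl ⟨⟨hxk, hxs⟩, Or.inl ⟨hlt, hmem⟩⟩)
      · have hsu : p.1 = u := by simpa using hmem
        refine Or.inl (Or.inr ⟨hsu, ?_, ?_⟩)
        · rw [← hsu]; exact hx_row
        · exact (hrest q.1).2 ⟨hxk, by rw [← hsu]; exact hlt⟩
    · obtain ⟨⟨hlt, hmem⟩, hsm⟩ := hcase
      rcases List.mem_append.1 hmem with hmem | hmem
      · exact Or.inl (Or.inl ⟨⟨hxk, hxs⟩, Or.inr ⟨⟨hlt, hmem⟩, hsm⟩⟩)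
      · have hxu : q.1 = u := by simpa using hmem
        refine Or.inr ⟨hxu, ?_, ?_⟩
        · exact (hF5 p.1).1 (by rw [← hxu]; exact hsm)
        · exact (hrest p.1).2 ⟨hs, by rw [← hxu]; exact hlt⟩

theorem pv_outer_loop (td : List (String × List (String × Int)))
    (hk : (pvKeys td).Nodup) (hin : ∀ p ∈ td, (p.2.map Prod.fst).Nodup)
    (hmut : List.Pairwise (fun p q => q.1 ∈ p.2.map Prod.fst → p.1 ∈ q.2.map Prod.fst) td)
    (rest done : List String) (hsplit : pvKeys td = done ++ rest) :
    rest.foldl (fun st sender =>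
        let senders := (PySem.Set.remove? st.2 sender).getD st.2
        let recvs := PySem.Set.inter
          (PySem.Set.ofList (PySem.Dict.getD st.1 sender (PySem.Dict.mk [])).keys) senders
        (recvs.foldl (pvStepA sender) st.1, senders))
      (pvMid td (pvExam td done), rest)
      = (pvMid td (pvExam td (pvKeys td)), ([] : List String)) := by
  induction rest generalizing done with
  | nil =>
    rw [List.append_nil] at hsplit
    rw [List.foldl_nil, hsplit]
  | cons u rest' ih =>
    have hkk := hk
    rw [hsplit, List.nodup_append] at hkk
    obtain ⟨hd, hur', hdisj⟩ := hkk
    have hu_nd : u ∉ done := fun h => hdisj u h u List.mem_cons_self rfl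
    have hu_nr : u ∉ rest' := by simpa using (List.nodup_cons.1 hur').1
    have hu : u ∈ pvKeys td := by rw [hsplit]; exact List.mem_append_right _ List.mem_cons_self
    obtain ⟨pu, hpu, hpu1⟩ := pv_exists_entry td hu
    have hrowu : pvRow td u = pu.2 := by rw [← hpu1]; exact pvRow_of_mem td hk hpu
    have hndu : (pu.2.map Prod.fst).Nodup := hin pu hpu
    have hsend : (PySem.Set.remove? (u :: rest') u).getD (u :: rest') = rest' := by
      have hc : PySem.Set.contains (u :: rest') u = true := by
        simp [PySem.Set.contains]
      simp only [PySem.Set.remove?, hc, if_true, Option.getD_some, PySem.Set.discard]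
      rw [List.filter_cons]
      rw [if_neg (by simp)]
      apply List.filter_eq_self.2
      intro x hx
      simp only [Bool.not_eq_eq_eq_not, Bool.not_true]
      exact beq_eq_false_iff_ne.2 (fun h => hu_nr (h ▸ hx))
    set recvs0 : List String := (pu.2.map Prod.fst).filter (fun x => rest'.contains x) with hrecvs0
    have hrec : ∀ x, x ∈ recvs0 ↔ x ∈ (pvRow td u).map Prod.fst ∧ x ∈ rest' := by
      intro x
      rw [hrecvs0, List.mem_filter, hrowu]
      simp
    have hgetu : PySem.Dict.getD (pvMid td (pvExam td done)) u (PySem.Dict.mk [])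
        = PySem.Dict.mk (pvFM (fun x w => pvG td (pvExam td done) u x w) pu.2) := by
      have h0 := pvMid_getD td (pvExam td done) hk hpu
      rw [hpu1] at h0
      rw [h0, pvMidRow_eq_FM]
    have hinter : PySem.Set.inter
        (PySem.Set.ofList (PySem.Dict.getD (pvMid td (pvExam td done)) u (PySem.Dict.mk [])).keys)
        rest' = recvs0 := by
      rw [hgetu]
      show PySem.Set.inter (PySem.Set.ofList ((pvFM (fun x w => pvG td (pvExam td done) u x w) pu.2).map (fun x => x.1))) rest' = recvs0
      rw [show ((pvFM (fun x w => pvG td (pvExam td done) u x w) pu.2).map (fun x => x.1))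
          = ((pvFM (fun x w => pvG td (pvExam td done) u x w) pu.2).map Prod.fst) from rfl]
      rw [PySem.Set.ofList_eq_self_of_nodup _ (pvFM_nodup _ hndu)]
      show ((pvFM (fun x w => pvG td (pvExam td done) u x w) pu.2).map Prod.fst).filter
        (fun x => rest'.contains x) = recvs0
      rw [hrecvs0]
      apply pvFM_filter_keys
      intro q hq hnone
      by_cases hE : pvExam td done u q.1 = true
      · have hE' := hE
        simp only [pvExam, Bool.and_eq_true, Bool.or_eq_true, decide_eq_true_eq] at hE'
        obtain ⟨_, hOr⟩ := hE'
        rcases hOr with ⟨_, hdmem⟩ | ⟨⟨_, hdmem⟩, _⟩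
        · exact absurd hdmem hu_nd
        · simp only [List.contains_eq_mem, decide_eq_false_iff_not]
          intro hmem'
          exact hdisj q.1 hdmem q.1 (List.mem_cons_of_mem _ hmem') rfl
      · simp only [pvG, if_neg hE] at hnone
        exact absurd hnone (by simp)
    have hstart : pvMid td (pvExam td done) = pvMid td (pvExamP td done u []) :=
      pvMid_congr td (fun p hp q hq => by simp [pvExamP])
    have hnd0 : (([] : List String) ++ recvs0).Nodup := by
      simpa [hrecvs0] using List.Nodup.filter _ hndu
    have hsub0 : ∀ x ∈ ([] : List String) ++ recvs0,
        x ∈ rest' ∧ x ∈ (pvRow td u).map Prod.fst := by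
      intro x hx
      rw [List.nil_append] at hx
      obtain ⟨h1, h2⟩ := (hrec x).1 hx
      exact ⟨h2, h1⟩
    have hinner := pv_inner_loop td hk hin hmut hsplit recvs0 [] hnd0 hsub0
    rw [List.nil_append] at hinner
    have hexs : pvMid td (pvExamP td done u recvs0) = pvMid td (pvExam td (done ++ [u])) :=
      pvMid_congr td (fun p hp q hq => pv_exam_step td hk hsplit hrec hp hq)
    rw [List.foldl_cons]
    have happ : (recvs0.foldl (pvStepA u) (pvMid td (pvExam td done)), rest')
        = (pvMid td (pvExam td (done ++ [u])), rest') := by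
      rw [hstart, hinner, hexs]
    calc _ = rest'.foldl _ (pvMid td (pvExam td (done ++ [u])), rest') := by
            show rest'.foldl _ _ = _
            congr 1
            simp only [hsend, hinter]
            exact happ
      _ = (pvMid td (pvExam td (pvKeys td)), ([] : List String)) :=
            ih (done ++ [u]) (by rw [hsplit, List.append_assoc, List.singleton_append])

-- ---- B side ----
theorem pv_pos_get (ks : List String) :
    ∀ (i : Int) (d : PySem.Dict String Int) (x : String), ks.Nodup →
      ((PySem.List.enumerate ks i).foldl (fun d q => d.insert q.2 q.1) d).get? x
        = if x ∈ ks then some (i + (ks.idxOf x : Int)) else d.get? x := by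
  induction ks with
  | nil =>
    intro i d x _
    simp [PySem.List.enumerate]
  | cons k ks ih =>
    intro i d x hnd
    obtain ⟨hknotin, hnd'⟩ := List.nodup_cons.1 hnd
    have henum : PySem.List.enumerate (k :: ks) i = (i, k) :: PySem.List.enumerate ks (i + 1) := by
      simp [PySem.List.enumerate]
    rw [henum, List.foldl_cons]
    rw [ih (i + 1) (d.insert k i) x hnd']
    by_cases hxk : x = k
    · subst hxk
      rw [if_neg hknotin, if_pos List.mem_cons_self]
      rw [PySem.Dict.get?_insert_self]
      simp [List.idxOf_cons_self]
    · by_cases hxks : x ∈ ks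
      · rw [if_pos hxks, if_pos (List.mem_cons_of_mem _ hxks)]
        rw [List.idxOf_cons_ne _ (Ne.symm hxk)]
        congr 1
        push_cast
        ring
      · rw [if_neg hxks, if_neg (by simp [hxk, hxks])]
        exact PySem.Dict.get?_insert_of_ne _ _ hxk

-- B's per-entry decision as an Option-valued function (`some v` = keep with value v).
def pvDec (td : List (String × List (String × Int))) (s r : String) (a : Int) : Option Int :=
  let tdd : PySem.Dict String (PySem.Dict String Int) :=
    PySem.Dict.mk (td.map (fun p => (p.1, PySem.Dict.mk p.2)))
  let pos : PySem.Dict String Int :=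
    (PySem.List.enumerate (td.map Prod.fst)).foldl (fun d q => d.insert q.2 q.1) PySem.Dict.empty
  if r = s ∨ ¬ (pos.contains r = true) then some a
  else if pos.getD s 0 < pos.getD r 0 then
    let dif := a - (PySem.Dict.getD tdd r (PySem.Dict.mk [])).getD s 0
    if 0 < dif then some dif else none
  else
    let back := PySem.Dict.getD tdd r (PySem.Dict.mk [])
    if back.contains s then
      let dif := a - back.getD s 0
      if 0 ≤ dif then some dif else none
    else some a

theorem pv_fold_generic (c : String → Int → Option Int)
    (body : PySem.Dict String Int → (String × Int) → PySem.Dict String Int)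
    (hbody : ∀ d q, body d q = match c q.1 q.2 with
      | some v => d.insert q.1 v
      | none => d) :
    ∀ (row : List (String × Int)) (d : PySem.Dict String Int),
      (row.map Prod.fst).Nodup →
      (∀ x ∈ row.map Prod.fst, d.contains x = false) →
      row.foldl body d = PySem.Dict.mk (d.items ++ pvFM c row) := by
  intro row
  induction row with
  | nil => intro d _ _; simp [pvFM]
  | cons q row ih =>
    intro d hnd hfresh
    obtain ⟨hqnot, hnd'⟩ := by
      rw [List.map_cons, List.nodup_cons] at hnd
      exact hnd
    rw [List.foldl_cons, hbody d q]
    cases hc : c q.1 q.2 with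
    | none =>
      rw [ih d hnd' (fun x hx => hfresh x (by simp [hx]))]
      congr 1
      unfold pvFM
      simp [List.filterMap_cons, hc]
    | some v =>
      have hf : d.contains q.1 = false := hfresh q.1 (by simp)
      have hitems : (d.insert q.1 v).items = d.items ++ [(q.1, v)] :=
        PySem.Dict.items_insert_of_not_contains _ _ hf
      rw [ih (d.insert q.1 v) hnd' ?fresh]
      case fresh =>
        intro x hx
        rw [PySem.Dict.contains_insert]
        have hxq : x ≠ q.1 := fun h => hqnot (h ▸ hx)
        simp [hxq, hfresh x (by simp [hx])]
      rw [hitems]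
      congr 1
      unfold pvFM
      simp [List.filterMap_cons, hc]

theorem pv_fold_B (td : List (String × List (String × Int))) (s : String) :
    ∀ (row : List (String × Int)) (d : PySem.Dict String Int),
      (row.map Prod.fst).Nodup →
      (∀ x ∈ row.map Prod.fst, d.contains x = false) →
      row.foldl (fun (inner : PySem.Dict String Int) q =>
        let receiver := q.1
        let amount := q.2
        if receiver = s ∨ ¬ ((((PySem.List.enumerate (td.map Prod.fst)).foldl
              (fun d q => d.insert q.2 q.1) PySem.Dict.empty)).contains receiver = true) then
          inner.insert receiver amount
        else if ((PySem.List.enumerate (td.map Prod.fst)).foldl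
              (fun d q => d.insert q.2 q.1) PySem.Dict.empty).getD s 0
                < ((PySem.List.enumerate (td.map Prod.fst)).foldl
              (fun d q => d.insert q.2 q.1) PySem.Dict.empty).getD receiver 0 then
          let dif := amount - (PySem.Dict.getD
              (PySem.Dict.mk (td.map (fun p => (p.1, PySem.Dict.mk p.2)))) receiver
              (PySem.Dict.mk [])).getD s 0
          if 0 < dif then inner.insert receiver dif else inner
        else
          let back := PySem.Dict.getD
              (PySem.Dict.mk (td.map (fun p => (p.1, PySem.Dict.mk p.2)))) receiver
              (PySem.Dict.mk [])
          if back.contains s then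
            let dif := amount - back.getD s 0
            if 0 ≤ dif then inner.insert receiver dif else inner
          else inner.insert receiver amount) d
        = PySem.Dict.mk (d.items ++ pvFM (pvDec td s) row) := by
  intro row d hnd hfresh
  apply pv_fold_generic (pvDec td s) _ ?hb row d hnd hfresh
  case hb =>
    intro d q
    simp only [pvDec]
    split_ifs <;> rfl

theorem pv_dec_eq (td : List (String × List (String × Int)))
    (hk : (pvKeys td).Nodup) (hin : ∀ p ∈ td, (p.2.map Prod.fst).Nodup)
    {p : String × List (String × Int)} (hp : p ∈ td) {q : String × Int} (hq : q ∈ p.2) :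
    pvDec td p.1 q.1 q.2 = pvG td (pvExam td (pvKeys td)) p.1 q.1 q.2 := by
  have hs : p.1 ∈ pvKeys td := List.mem_map.2 ⟨p, hp, rfl⟩
  have hposget : ∀ x, ((PySem.List.enumerate (td.map Prod.fst)).foldl
      (fun d q => d.insert q.2 q.1) PySem.Dict.empty).get? x
      = if x ∈ pvKeys td then some (((pvKeys td).idxOf x : Int)) else none := by
    intro x
    rw [pv_pos_get (td.map Prod.fst) 0 PySem.Dict.empty x hk]
    by_cases h : x ∈ pvKeys td
    · rw [if_pos (by simpa [pvKeys] using h), if_pos h]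
      simp [pvKeys]
    · rw [if_neg (by simpa [pvKeys] using h), if_neg h, PySem.Dict.get?_empty]
  have hgetDpos : ∀ x ∈ pvKeys td, PySem.Dict.getD ((PySem.List.enumerate (td.map Prod.fst)).foldl
      (fun d q => d.insert q.2 q.1) PySem.Dict.empty) x 0 = ((pvKeys td).idxOf x : Int) := by
    intro x hx
    show (((PySem.List.enumerate (td.map Prod.fst)).foldl
      (fun d q => d.insert q.2 q.1) PySem.Dict.empty).get? x).getD 0 = _
    rw [hposget x, if_pos hx]
    rfl
  have hcont : ∀ x, ((PySem.List.enumerate (td.map Prod.fst)).foldl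
      (fun d q => d.insert q.2 q.1) PySem.Dict.empty).contains x = decide (x ∈ pvKeys td) := by
    intro x
    rw [PySem.Dict.contains_eq_isSome_get?, hposget x]
    by_cases h : x ∈ pvKeys td <;> simp [h]
  simp only [pvDec]
  by_cases hrs : q.1 = p.1
  · rw [if_pos (Or.inl hrs)]
    simp [pvG, pvExam, hrs]
  · by_cases hrk : q.1 ∈ pvKeys td
    · rw [if_neg (by rw [hcont]; simp [hrs, hrk])]
      obtain ⟨pr, hpr, hpr1⟩ := pv_exists_entry td hrk
      have hrowr : pvRow td q.1 = pr.2 := by rw [← hpr1]; exact pvRow_of_mem td hk hpr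
      have htdd : PySem.Dict.getD (PySem.Dict.mk (td.map (fun p => (p.1, PySem.Dict.mk p.2))))
          q.1 (PySem.Dict.mk []) = PySem.Dict.mk pr.2 := by
        apply PySem.Dict.getD_of_mem_items
        · exact List.mem_map.2 ⟨pr, hpr, by rw [hpr1]⟩
        · show ((td.map _).map Prod.fst).Nodup
          simpa [List.map_map, Function.comp_def, pvKeys] using hk
      have hvalgetD : (PySem.Dict.mk pr.2).getD p.1 0 = (pvVal td q.1 p.1).getD 0 := by
        unfold pvVal
        rw [hrowr]
        rfl
      have hvalcont : (PySem.Dict.mk pr.2).contains p.1 = (pvVal td q.1 p.1).isSome := by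
        rw [PySem.Dict.contains_eq_isSome_get?]
        unfold pvVal
        rw [hrowr]
      rw [hgetDpos p.1 hs, hgetDpos q.1 hrk, htdd]
      by_cases hlt : (pvKeys td).idxOf p.1 < (pvKeys td).idxOf q.1
      · rw [if_pos (by exact_mod_cast hlt)]
        rw [hvalgetD]
        have hexam : pvExam td (pvKeys td) p.1 q.1 = true := by
          simp [pvExam, hrk, hrs, hlt, hs]
        rw [pvG, if_pos hexam]
        unfold pvFin
        rw [if_pos hlt]
      · rw [if_neg (by exact_mod_cast hlt)]
        rw [hvalcont, hvalgetD]
        have hexam : pvExam td (pvKeys td) p.1 q.1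
            = (pvVal td q.1 p.1).isSome := by
          simp only [pvExam, Bool.and_eq_true, Bool.or_eq_true, decide_eq_true_eq]
          cases hv : (pvVal td q.1 p.1).isSome
          · simp [hrk, hrs, hlt]
          · have hlt' : (pvKeys td).idxOf q.1 < (pvKeys td).idxOf p.1 := by
              have : (pvKeys td).idxOf q.1 ≠ (pvKeys td).idxOf p.1 :=
                fun h => hrs (pvIdx_inj td hrk hs h)
              omega
            simp [hrk, hrs, hlt']
        rw [pvG, hexam]
        cases hv : (pvVal td q.1 p.1).isSome
        · simp only [Bool.false_eq_true, if_false]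
        · simp only [if_true]
          unfold pvFin
          rw [if_neg hlt]
    · rw [if_pos (Or.inr (by rw [hcont]; simp [hrk]))]
      simp [pvG, pvExam, hrk]

theorem pv_alt_eq (td : List (String × List (String × Int)))
    (hk : (pvKeys td).Nodup) (hin : ∀ p ∈ td, (p.2.map Prod.fst).Nodup) :
    net_payments_alt td = td.map (fun p => (p.1, pvMidRow td (pvExam td (pvKeys td)) p.1 p.2)) := by
  show (td.map (fun p => (p.1, PySem.Dict.mk p.2))).map _ = _
  rw [List.map_map]
  apply List.map_congr_left
  intro p hp
  show (p.1, (p.2.foldl _ PySem.Dict.empty).items) = (p.1, pvMidRow td (pvExam td (pvKeys td)) p.1 p.2)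
  rw [pv_fold_B td p.1 p.2 PySem.Dict.empty (hin p hp)
    (fun x _ => PySem.Dict.contains_empty x)]
  show (p.1, PySem.Dict.empty.items ++ pvFM (pvDec td p.1) p.2) = _
  rw [show (PySem.Dict.empty : PySem.Dict String Int).items = [] from rfl, List.nil_append,
    pvMidRow_eq_FM]
  exact congrArg _ (pvFM_congr (fun q hq => pv_dec_eq td hk hin hp hq))

theorem pv_A_eq (td : List (String × List (String × Int)))
    (hk : (pvKeys td).Nodup) (hin : ∀ p ∈ td, (p.2.map Prod.fst).Nodup)
    (hmut : List.Pairwise (fun p q => q.1 ∈ p.2.map Prod.fst → p.1 ∈ q.2.map Prod.fst) td) :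
    net_payments td = td.map (fun p => (p.1, pvMidRow td (pvExam td (pvKeys td)) p.1 p.2)) := by
  have hinit : PySem.Dict.mk (td.map (fun p => (p.1, PySem.Dict.mk p.2)))
      = pvMid td (pvExam td []) := by
    unfold pvMid
    congr 1
    apply List.map_congr_left
    intro p hp
    congr 1
    congr 1
    rw [pvMidRow_eq_FM]
    symm
    calc pvFM (fun x w => pvG td (pvExam td []) p.1 x w) p.2
        = pvFM (fun _ a => some a) p.2 :=
          pvFM_congr (fun q hq => by simp [pvG, pvExam])
      _ = p.2 := pvFM_id p.2
  have hof : PySem.Set.ofList (pvKeys td) = pvKeys td :=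
    PySem.Set.ofList_eq_self_of_nodup _ hk
  have hfold := pv_outer_loop td hk hin hmut (pvKeys td) [] (by simp)
  show (((pvKeys td).foldl (fun st sender =>
      let senders := (PySem.Set.remove? st.2 sender).getD st.2
      let recvs := PySem.Set.inter
        (PySem.Set.ofList (PySem.Dict.getD st.1 sender (PySem.Dict.mk [])).keys) senders
      (recvs.foldl (pvStepA sender) st.1, senders))
      (PySem.Dict.mk (td.map (fun p => (p.1, PySem.Dict.mk p.2))),
        PySem.Set.ofList (pvKeys td))).1).items.map (fun p => (p.1, p.2.items)) = _
  rw [hinit, hof, hfold]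
  show (td.map _).map _ = _
  rw [List.map_map]
  apply List.map_congr_left
  intro p hp
  rfl

-- ===== VERDICT (by name: the statement is the Claim_ definition above) =====
theorem net_payments_spec : Claim_equal_net_payments := by
  intro td _hDom hPre
  obtain ⟨hk, hin, hmut⟩ := hPre
  unfold Spec_net_payments
  rw [pv_A_eq td hk hin hmut, pv_alt_eq td hk hin]
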